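-- pv_equiv track=rewrite | github.com/mSulimenko/dla_loxa | Sulimenko_Maxim_lb4/src/task2.py | execute_kmp_circle_algorithm
-- ===== SOURCE A (Python) =====
-- def get_prefixes(word):
--     jCount = 0
--     iCount = 1
--     prefixArray = [0] * len(word)
--
--     while iCount < len(word):
--         if word[jCount] == word[iCount]:
--             prefixArray[iCount] = jCount + 1
--             iCount += 1
--             jCount += 1
--         else:
--             if jCount == 0:
--                 prefixArray[iCount] = 0
--                 iCount += 1
--             else:
--                 jCount = prefixArray[jCount - 1]
--
--     return prefixArray
--
-- def execute_kmp_circle_algorithm(word, text):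
--
--     wordLength = len(word)
--     textLength = len(text)
--     prefixArray = get_prefixes(word)
--     shiftIndex = -1
--     iCount = 0
--     jCount = 0
--
--     if wordLength != textLength:
--         return shiftIndex
--
--     while iCount < textLength * 2:
--         if text[iCount % textLength] == word[jCount]:
--             iCount += 1
--             jCount += 1
--             if jCount == wordLength:
--                 shiftIndex = iCount - wordLength
--                 return shiftIndex
--         else:
--             if jCount > 0:
--                 jCount = prefixArray[jCount - 1]
--             else:
--                 iCount += 1
--
--     return shiftIndex
-- ===== SOURCE B (Python) =====
-- def execute_kmp_circle_algorithm(word, text):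
--     if len(word) != len(text):
--         return -1
--     return (text + text).find(word)
-- ===== Notes on version B (the rewrite author's own statement) =====
-- stated objective: idiomatic
-- what changed: Replaces the hand-written prefix-function computation and modular KMP scan with a single library substring search on the doubled text, (text + text).find(word), after the length check; the C-implemented str.find gives a large constant-factor speedup over the interpreted KMP loop.
-- intended difference: On the single input word='' and text='', A returns -1 although the empty word matches the empty text at shift 0; B returns 0, the intended circular shift, since every string is a rotation of itself at shift 0. — e.g. on execute_kmp_circle_algorithm("", ""): A returns -1, B returns 0
import Mathlib
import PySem

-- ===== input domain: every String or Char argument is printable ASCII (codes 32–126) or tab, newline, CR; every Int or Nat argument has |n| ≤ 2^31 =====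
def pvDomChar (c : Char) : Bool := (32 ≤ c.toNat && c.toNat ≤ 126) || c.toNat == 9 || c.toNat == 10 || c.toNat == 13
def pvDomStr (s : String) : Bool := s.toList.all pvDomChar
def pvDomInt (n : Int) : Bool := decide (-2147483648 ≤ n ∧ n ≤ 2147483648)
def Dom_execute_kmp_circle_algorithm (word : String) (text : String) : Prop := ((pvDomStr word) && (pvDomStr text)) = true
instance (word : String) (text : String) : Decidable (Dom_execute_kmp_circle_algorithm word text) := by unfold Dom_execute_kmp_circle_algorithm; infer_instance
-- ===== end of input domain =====

-- B replaces A's hand-written prefix function and modular KMP scan by a single library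
-- substring search on the doubled text ((text+text).find(word)); same result except on
-- the empty pair, stated as an intended difference below.

-- ===== PORT A =====
-- the 'while iCount < len(word)' loop of get_prefixes; fuel only makes the loop total
-- (2*len(word)+1 provably suffices, see pvPrefixLoop_spec below)
def pvGetPrefixesLoop (w : List Char) (fuel : Nat) (j i : Nat) (arr : List Nat) : List Nat :=
  match fuel with
  | 0 => arr
  | fuel + 1 =>
    if i < w.length then
      if PySem.List.pyGet? w (j : Int) = PySem.List.pyGet? w (i : Int) then
        pvGetPrefixesLoop w fuel (j + 1) (i + 1) (arr.set i (j + 1))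
      else if j = 0 then
        pvGetPrefixesLoop w fuel j (i + 1) (arr.set i 0)
      else
        pvGetPrefixesLoop w fuel (arr.getD (j - 1) 0) i arr
    else arr

def pvGetPrefixes (w : List Char) : List Nat :=
  pvGetPrefixesLoop w (2 * w.length + 1) 0 1 (List.replicate w.length 0)

-- the 'while iCount < textLength * 2' loop; fuel only makes the loop total
-- (4*len(text)+1 provably suffices, see pvKmpLoop_eq_find below)
def pvKmpLoop (w t : List Char) (P : List Nat) (fuel : Nat) (i j : Nat) : Int :=
  match fuel with
  | 0 => -1
  | fuel + 1 =>
    if i < 2 * t.length then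
      if PySem.List.pyGet? t ((i % t.length : Nat) : Int) = PySem.List.pyGet? w (j : Int) then
        if j + 1 = w.length then ((i : Int) + 1) - (w.length : Int)
        else pvKmpLoop w t P fuel (i + 1) (j + 1)
      else if j > 0 then
        pvKmpLoop w t P fuel i (P.getD (j - 1) 0)
      else
        pvKmpLoop w t P fuel (i + 1) j
    else -1

def execute_kmp_circle_algorithm (word : String) (text : String) : Int :=
  let w := word.toList
  let t := text.toList
  let P := pvGetPrefixes w
  if w.length ≠ t.length then -1
  else pvKmpLoop w t P (4 * t.length + 1) 0 0

-- ===== PORT B =====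
def execute_kmp_circle_algorithm_alt (word : String) (text : String) : Int :=
  if word.toList.length ≠ text.toList.length then -1
  else PySem.Chars.find (text.toList ++ text.toList) word.toList

-- ===== PRECONDITION & SPEC =====
-- On word='' and text='' A returns -1 although the empty word matches the empty text at
-- circular shift 0; B returns 0, the intended shift (every string is its own rotation at 0).
def D_execute_kmp_circle_algorithm (word : String) (text : String) : Prop :=
  word = "" ∧ text = ""
instance (word : String) (text : String) : Decidable (D_execute_kmp_circle_algorithm word text) := by
  unfold D_execute_kmp_circle_algorithm; infer_instance

def Spec_execute_kmp_circle_algorithm (word : String) (text : String) (out : Int) : Prop :=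
  ¬ D_execute_kmp_circle_algorithm word text → out = execute_kmp_circle_algorithm_alt word text
instance (word : String) (text : String) (out : Int) : Decidable (Spec_execute_kmp_circle_algorithm word text out) := by
  unfold Spec_execute_kmp_circle_algorithm; infer_instance

def pvDiffWitness_execute_kmp_circle_algorithm : String × String := ("", "")
def pvDiffWitnessOut_execute_kmp_circle_algorithm : Int × Int := (-1, 0)

-- ===== CLAIM (what is proved, stated in full; the proofs are below) =====
def Claim_unchanged_execute_kmp_circle_algorithm : Prop := ∀ (word : String) (text : String), Dom_execute_kmp_circle_algorithm word text → Spec_execute_kmp_circle_algorithm word text (execute_kmp_circle_algorithm word text)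
def Claim_changed_execute_kmp_circle_algorithm : Prop := Dom_execute_kmp_circle_algorithm (pvDiffWitness_execute_kmp_circle_algorithm.1) (pvDiffWitness_execute_kmp_circle_algorithm.2) ∧ D_execute_kmp_circle_algorithm (pvDiffWitness_execute_kmp_circle_algorithm.1) (pvDiffWitness_execute_kmp_circle_algorithm.2) ∧ execute_kmp_circle_algorithm (pvDiffWitness_execute_kmp_circle_algorithm.1) (pvDiffWitness_execute_kmp_circle_algorithm.2) = pvDiffWitnessOut_execute_kmp_circle_algorithm.1 ∧ execute_kmp_circle_algorithm_alt (pvDiffWitness_execute_kmp_circle_algorithm.1) (pvDiffWitness_execute_kmp_circle_algorithm.2) = pvDiffWitnessOut_execute_kmp_circle_algorithm.2 ∧ pvDiffWitnessOut_execute_kmp_circle_algorithm.1 ≠ pvDiffWitnessOut_execute_kmp_circle_algorithm.2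
def Claim_exact_execute_kmp_circle_algorithm : Prop := ∀ (word : String) (text : String), Dom_execute_kmp_circle_algorithm word text → D_execute_kmp_circle_algorithm word text → execute_kmp_circle_algorithm word text ≠ execute_kmp_circle_algorithm_alt word text

-- ===== LEMMAS AND PROOFS =====

def pvBord (w : List Char) (m : Nat) : Nat :=
  Nat.findGreatest (fun k => w.take k <:+ w.take m) (m - 1)

theorem pvBord_lt (w : List Char) (m : Nat) (hm : 0 < m) : pvBord w m < m := by
  have := Nat.findGreatest_le (P := fun k => w.take k <:+ w.take m) (m - 1)
  unfold pvBord; omega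

theorem pvBord_suffix (w : List Char) (m : Nat) : w.take (pvBord w m) <:+ w.take m :=
  Nat.findGreatest_spec (P := fun k => w.take k <:+ w.take m) (Nat.zero_le _) (by simp)

theorem pvBord_max (w : List Char) (m k : Nat) (hk : k < m) (h : w.take k <:+ w.take m) :
    k ≤ pvBord w m :=
  Nat.le_findGreatest (by omega) h

theorem pvConcat_suffix_concat {a s : List Char} {x c : Char} :
    a ++ [x] <:+ s ++ [c] ↔ a <:+ s ∧ x = c := by
  rw [← List.reverse_prefix]
  simp only [List.reverse_append, List.reverse_singleton, List.singleton_append,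
    List.cons_prefix_cons, List.reverse_prefix]
  tauto

theorem pvExt_suffix {w s : List Char} {c : Char} {k : Nat} (hk : k < w.length) :
    w.take (k + 1) <:+ s ++ [c] ↔ (w.take k <:+ s ∧ w[k]? = some c) := by
  rw [List.take_add_one, List.getElem?_eq_getElem hk]
  simp only [Option.toList_some]
  rw [pvConcat_suffix_concat]
  simp

theorem pvTake_succ {l : List Char} {i : Nat} (h : i < l.length) :
    l.take (i + 1) = l.take i ++ [l[i]] := by
  rw [List.take_add_one, List.getElem?_eq_getElem h]; rfl

def pvPInv (w : List Char) (i j : Nat) (arr : List Nat) : Prop :=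
  arr.length = w.length ∧ j < i ∧
  w.take j <:+ w.take i ∧
  (∀ m, m < i → arr.getD m 0 = pvBord w (m + 1)) ∧
  (i < w.length → ∀ k, k < i + 1 → w.take k <:+ w.take (i + 1) → k ≤ j + 1)

theorem pvPrefixLoop_spec (w : List Char) (fuel : Nat) : ∀ (i j : Nat) (arr : List Nat),
    pvPInv w i j arr → 2 * (w.length - i) + j + 1 ≤ fuel →
    (pvGetPrefixesLoop w fuel j i arr).length = w.length ∧
    (∀ m, m < w.length → (pvGetPrefixesLoop w fuel j i arr).getD m 0 = pvBord w (m + 1)) := by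
  induction fuel with
  | zero => intro i j arr _ hfuel; omega
  | succ fuel ih =>
    intro i j arr hInv hfuel
    obtain ⟨hlen, hji, hsuf, hspec, hfifth⟩ := hInv
    rw [pvGetPrefixesLoop]
    by_cases hi : i < w.length
    · have hjlt : j < w.length := by omega
      have hgj : PySem.List.pyGet? w (j : Int) = some w[j] := by
        rw [PySem.List.pyGet?_natCast, List.getElem?_eq_getElem hjlt]
      have hgi : PySem.List.pyGet? w (i : Int) = some w[i] := by
        rw [PySem.List.pyGet?_natCast, List.getElem?_eq_getElem hi]
      simp only [hi, if_true, hgj, hgi]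
      have htsucc : w.take (i + 1) = w.take i ++ [w[i]] := pvTake_succ hi
      by_cases hc : w[j] = w[i]
      · -- match branch
        simp only [hc, if_true]
        -- the new entry is correct: j+1 = pvBord w (i+1)
        have hsj : w.take (j + 1) <:+ w.take (i + 1) := by
          rw [htsucc]
          exact (pvExt_suffix hjlt).2 ⟨hsuf, by rw [List.getElem?_eq_getElem hjlt, hc]⟩
        have hb1 : j + 1 ≤ pvBord w (i + 1) := pvBord_max w (i + 1) (j + 1) (by omega) hsj
        have hb2 : pvBord w (i + 1) ≤ j + 1 :=
          hfifth hi _ (pvBord_lt w (i + 1) (by omega)) (pvBord_suffix w (i + 1))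
        have hentry : j + 1 = pvBord w (i + 1) := by omega
        apply ih
        · refine ⟨by simpa using hlen, by omega, hsj, ?_, ?_⟩
          · intro m hm
            rcases Nat.lt_or_ge m i with hmi | hmi
            · rw [List.getD_eq_getElem?_getD, List.getElem?_set_ne (by omega),
                ← List.getD_eq_getElem?_getD]
              exact hspec m hmi
            · have : m = i := by omega
              subst this
              rw [List.getD_eq_getElem?_getD, List.getElem?_set_self (by omega)]
              simpa using hentry
          · intro hi1 k hk hks
            match k, hk with
            | 0, _ => omega
            | k' + 1, hk =>
              have hk'w : k' < w.length := by omega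
              rw [pvTake_succ hi1] at hks
              obtain ⟨h1, _⟩ := (pvExt_suffix hk'w).1 hks
              have := pvBord_max w (i + 1) k' (by omega) h1
              omega
        · omega
      · -- mismatch
        have hne : ¬ (some w[j] = some w[i]) := by simpa using hc
        simp only [hne, if_false]
        by_cases hj0 : j = 0
        · subst hj0
          simp only [if_true]
          -- pvBord w (i+1) = 0
          have hb0 : pvBord w (i + 1) = 0 := by
            by_contra hb
            have h1 : pvBord w (i + 1) ≤ 1 :=
              hfifth hi _ (pvBord_lt w (i + 1) (by omega)) (pvBord_suffix w (i + 1))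
            have hbe : pvBord w (i + 1) = 1 := by omega
            have := pvBord_suffix w (i + 1)
            rw [hbe, htsucc] at this
            obtain ⟨_, h2⟩ := (pvExt_suffix (show 0 < w.length by omega)).1 this
            rw [List.getElem?_eq_getElem (show 0 < w.length by omega)] at h2
            exact hc (by simpa using h2)
          apply ih
          · refine ⟨by simpa using hlen, by omega, by simp, ?_, ?_⟩
            · intro m hm
              rcases Nat.lt_or_ge m i with hmi | hmi
              · rw [List.getD_eq_getElem?_getD, List.getElem?_set_ne (by omega),
                  ← List.getD_eq_getElem?_getD]
                exact hspec m hmi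
              · have : m = i := by omega
                subst this
                rw [List.getD_eq_getElem?_getD, List.getElem?_set_self (by omega)]
                simpa using hb0.symm
            · intro hi1 k hk hks
              match k, hk with
              | 0, _ => omega
              | k' + 1, hk =>
                have hk'w : k' < w.length := by omega
                rw [pvTake_succ hi1] at hks
                obtain ⟨h1, _⟩ := (pvExt_suffix hk'w).1 hks
                have := pvBord_max w (i + 1) k' (by omega) h1
                omega
          · omega
        · simp only [hj0, if_false]
          have hj1 : j - 1 < i := by omega
          have hget : arr.getD (j - 1) 0 = pvBord w j := by
            have := hspec (j - 1) hj1
            rwa [Nat.sub_add_cancel (by omega)] at this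
          rw [hget]
          have hbj : pvBord w j < j := pvBord_lt w j (by omega)
          apply ih
          · refine ⟨hlen, by omega, ?_, hspec, ?_⟩
            · exact (pvBord_suffix w j).trans hsuf
            · intro hi' k hk hks
              match k, hk with
              | 0, _ => omega
              | k' + 1, hk =>
                have hk'w : k' < w.length := by omega
                rw [pvTake_succ hi'] at hks
                obtain ⟨h1, h2⟩ := (pvExt_suffix hk'w).1 hks
                have hklej : k' ≤ j := by
                  have := hfifth hi' (k' + 1) (by omega) (by rw [pvTake_succ hi']; exact hks)
                  omega
                have hkne : k' ≠ j := by
                  intro h; subst h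
                  rw [List.getElem?_eq_getElem hk'w] at h2
                  exact hc (by simpa using h2)
                have hkj : k' < j := by omega
                have hsub : w.take k' <:+ w.take j :=
                  List.suffix_of_suffix_length_le h1 hsuf
                    (by rw [List.length_take, List.length_take]; omega)
                have := pvBord_max w j k' hkj hsub
                omega
          · omega
    · simp only [hi, if_false]
      exact ⟨hlen, fun m hm => hspec m (by omega)⟩

theorem pvGetPrefixes_spec (w : List Char) :
    (pvGetPrefixesLoop w (2 * w.length + 1) 0 1 (List.replicate w.length 0)).length = w.length ∧
    (∀ m, m < w.length →
      (pvGetPrefixesLoop w (2 * w.length + 1) 0 1 (List.replicate w.length 0)).getD m 0 =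
        pvBord w (m + 1)) := by
  apply pvPrefixLoop_spec
  · refine ⟨by simp, by omega, by simp, ?_, by omega⟩
    intro m hm
    have : m = 0 := by omega
    subst this
    rw [List.getD_eq_getElem?_getD]
    have h0 : pvBord w 1 = 0 := by unfold pvBord; simp
    rcases Nat.eq_zero_or_pos w.length with h | h
    · simp [h, h0]
    · rw [List.getElem?_eq_getElem (by simpa using h)]
      simp [h0]
  · omega

theorem pvOcc_iff {w dd : List Char} {s : Nat} (h : s + w.length ≤ dd.length) :
    w <+: dd.drop s ↔ w <:+ dd.take (s + w.length) := by
  rw [List.prefix_iff_eq_take, List.suffix_iff_eq_drop]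
  rw [List.take_drop]
  rw [List.length_take]
  have h1 : min (s + w.length) dd.length = s + w.length := by omega
  rw [h1]
  have h2 : s + w.length - w.length = s := by omega
  rw [h2]

theorem pvFind_eq_of {w dd : List Char} {s : Nat} (h1 : w <+: dd.drop s)
    (h2 : ∀ s', s' < s → ¬ w <+: dd.drop s') : PySem.Chars.find dd w = (s : Int) := by
  have hinf : w <:+: dd := List.infix_iff_prefix_suffix.2 ⟨dd.drop s, h1, List.drop_suffix s dd⟩
  have hnn : 0 ≤ PySem.Chars.find dd w := (PySem.Chars.find_nonneg_iff dd w).2 hinf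
  obtain ⟨hp, hmin⟩ := PySem.Chars.find_spec (s := dd) (sub := w) hnn
  rcases lt_trichotomy (PySem.Chars.find dd w).toNat s with h | h | h
  · exact absurd hp (h2 _ h)
  · omega
  · exact absurd h1 (hmin s h)

-- t[i % |t|]? = (t ++ t)[i]?  for i < 2|t|
theorem pvMod_get {t : List Char} {i : Nat} (hi : i < 2 * t.length) :
    t[i % t.length]? = (t ++ t)[i]? := by
  rcases Nat.lt_or_ge i t.length with h | h
  · rw [Nat.mod_eq_of_lt h, List.getElem?_append_left h]
  · have h2 : i % t.length = i - t.length := by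
      rw [Nat.mod_eq_sub_mod h, Nat.mod_eq_of_lt (by omega)]
    rw [h2, List.getElem?_append_right h]

def pvKInv (w t : List Char) (i j : Nat) : Prop :=
  j < w.length ∧ j ≤ i ∧ i ≤ 2 * t.length ∧
  w.take j <:+ (t ++ t).take i ∧
  (∀ k, k ≤ w.length → w.take k <:+ (t ++ t).take (i + 1) → k ≤ j + 1) ∧
  (∀ m, m ≤ i → ¬ w <:+ (t ++ t).take m)

theorem pvKmpLoop_eq_find (w t : List Char) (P : List Nat)
    (hw : w.length = t.length) (hn : 0 < t.length)
    (hPl : P.length = w.length) (hP : ∀ m, m < w.length → P.getD m 0 = pvBord w (m + 1))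
    (fuel : Nat) : ∀ (i j : Nat),
    pvKInv w t i j → 2 * (2 * t.length - i) + j + 1 ≤ fuel →
    pvKmpLoop w t P fuel i j = PySem.Chars.find (t ++ t) w := by
  have hddlen : (t ++ t).length = 2 * t.length := by simp; omega
  induction fuel with
  | zero => intro i j _ hfuel; omega
  | succ fuel ih =>
    intro i j hInv hfuel
    obtain ⟨hjw, hji, hi2n, hsuf, hfifth, hsixth⟩ := hInv
    rw [pvKmpLoop]
    by_cases hi : i < 2 * t.length
    · have hiw : i < (t ++ t).length := by omega
      have hgt : PySem.List.pyGet? t ((i % t.length : Nat) : Int) = some ((t ++ t)[i]'hiw) := by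
        rw [PySem.List.pyGet?_natCast, pvMod_get hi, List.getElem?_eq_getElem hiw]
      have hgw : PySem.List.pyGet? w (j : Int) = some (w[j]'hjw) := by
        rw [PySem.List.pyGet?_natCast, List.getElem?_eq_getElem hjw]
      simp only [hi, if_true, hgt, hgw]
      have htsucc : (t ++ t).take (i + 1) = (t ++ t).take i ++ [(t ++ t)[i]'hiw] :=
        pvTake_succ hiw
      by_cases hc : (t ++ t)[i]'hiw = w[j]'hjw
      · -- chars match
        simp only [hc, if_true]
        have hsj : w.take (j + 1) <:+ (t ++ t).take (i + 1) := by
          rw [htsucc]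
          exact (pvExt_suffix hjw).2 ⟨hsuf, by rw [List.getElem?_eq_getElem hjw, hc]⟩
        by_cases hfull : j + 1 = w.length
        · -- full match: return the shift
          simp only [hfull, if_true]
          have hwtake : w.take (j + 1) = w := by rw [hfull]; simp
          rw [hwtake] at hsj
          have hsn : w.length ≤ i + 1 := by omega
          have hocc : w <+: (t ++ t).drop (i + 1 - w.length) := by
            rw [pvOcc_iff (by omega)]
            have : i + 1 - w.length + w.length = i + 1 := by omega
            rw [this]
            exact hsj
          have hmin : ∀ s', s' < i + 1 - w.length → ¬ w <+: (t ++ t).drop s' := by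
            intro s' hs' hcon
            rw [pvOcc_iff (by omega)] at hcon
            exact hsixth (s' + w.length) (by omega) hcon
          have := pvFind_eq_of hocc hmin
          rw [this]
          omega
        · -- partial match, advance
          simp only [hfull, if_false]
          apply ih
          · refine ⟨by omega, by omega, by omega, hsj, ?_, ?_⟩
            · intro k hk hks
              rcases Nat.lt_or_ge (i + 1) (2 * t.length) with hi1 | hi1
              · match k, hks with
                | 0, _ => omega
                | k' + 1, hks =>
                  have hk'w : k' < w.length := by omega
                  rw [pvTake_succ (show i + 1 < (t ++ t).length by omega)] at hks
                  obtain ⟨h1, _⟩ := (pvExt_suffix hk'w).1 hks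
                  have := hfifth k' (by omega) h1
                  omega
              · have heq : (t ++ t).take (i + 1 + 1) = (t ++ t).take (i + 1) := by
                  rw [List.take_of_length_le (by omega), List.take_of_length_le (by omega)]
                rw [heq] at hks
                have := hfifth k hk hks
                omega
            · intro m hm
              rcases Nat.lt_or_ge m (i + 1) with hmi | hmi
              · exact hsixth m (by omega)
              · have : m = i + 1 := by omega
                subst this
                intro hcon
                have : w.take w.length <:+ (t ++ t).take (i + 1) := by simpa using hcon
                have := hfifth w.length (le_refl _) this
                omega
          · omega
      · -- chars differ
        have hne : ¬ (some ((t ++ t)[i]'hiw) = some (w[j]'hjw)) := by simpa using hc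
        simp only [hne, if_false]
        by_cases hj0 : 0 < j
        · simp only [hj0, if_true]
          have hget : P.getD (j - 1) 0 = pvBord w j := by
            have := hP (j - 1) (by omega)
            rwa [Nat.sub_add_cancel (by omega)] at this
          rw [hget]
          have hbj : pvBord w j < j := pvBord_lt w j hj0
          apply ih
          · refine ⟨by omega, by omega, by omega, (pvBord_suffix w j).trans hsuf, ?_, hsixth⟩
            intro k hk hks
            match k, hks with
            | 0, _ => omega
            | k' + 1, hks =>
              have hk'w : k' < w.length := by omega
              rw [htsucc] at hks
              obtain ⟨h1, h2⟩ := (pvExt_suffix hk'w).1 hks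
              have hklej : k' ≤ j := by
                have := hfifth (k' + 1) hk (by rw [htsucc]; exact hks)
                omega
              have hkne : k' ≠ j := by
                intro h; subst h
                rw [List.getElem?_eq_getElem hk'w] at h2
                exact hc (by simpa using h2.symm)
              have hsub : w.take k' <:+ w.take j :=
                List.suffix_of_suffix_length_le h1 hsuf
                  (by rw [List.length_take, List.length_take]; omega)
              have := pvBord_max w j k' (by omega) hsub
              omega
          · omega
        · -- j = 0, advance i
          simp only [hj0, if_false]
          have hj : j = 0 := by omega
          subst hj
          apply ih
          · refine ⟨by omega, by omega, by omega, by simp, ?_, ?_⟩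
            · intro k hk hks
              rcases Nat.lt_or_ge (i + 1) (2 * t.length) with hi1 | hi1
              · match k, hks with
                | 0, _ => omega
                | k' + 1, hks =>
                  have hk'w : k' < w.length := by omega
                  rw [pvTake_succ (show i + 1 < (t ++ t).length by omega)] at hks
                  obtain ⟨h1, _⟩ := (pvExt_suffix hk'w).1 hks
                  have hk1 : k' ≤ 1 := hfifth k' (by omega) h1
                  -- k' = 1 is impossible: it would mean w[0] = (t++t)[i]
                  rcases Nat.eq_zero_or_pos k' with h0 | h0
                  · omega
                  · have hke : k' = 1 := by omega
                    subst hke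
                    rw [htsucc] at h1
                    obtain ⟨_, h2⟩ := (pvExt_suffix (show 0 < w.length by omega)).1 h1
                    rw [List.getElem?_eq_getElem (show 0 < w.length by omega)] at h2
                    exact absurd (by simpa using h2.symm) hc
              · have heq : (t ++ t).take (i + 1 + 1) = (t ++ t).take (i + 1) := by
                  rw [List.take_of_length_le (by omega), List.take_of_length_le (by omega)]
                rw [heq] at hks
                have := hfifth k hk hks
                omega
            · intro m hm
              rcases Nat.lt_or_ge m (i + 1) with hmi | hmi
              · exact hsixth m (by omega)
              · have : m = i + 1 := by omega
                subst this
                intro hcon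
                have hle1 : w.length ≤ 1 := by
                  have : w.take w.length <:+ (t ++ t).take (i + 1) := by simpa using hcon
                  exact hfifth w.length (le_refl _) this
                have hw1 : w.length = 1 := by omega
                have : w.take 1 <:+ (t ++ t).take (i + 1) := by
                  have := hcon
                  rw [show w = w.take 1 by rw [← hw1]; simp] at this
                  exact this
                rw [htsucc] at this
                obtain ⟨_, h2⟩ := (pvExt_suffix (show 0 < w.length by omega)).1 this
                rw [List.getElem?_eq_getElem (show 0 < w.length by omega)] at h2
                exact absurd (by simpa using h2.symm) hc
          · omega
    · -- loop exit: i = 2|t|, no occurrence anywhere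
      simp only [hi, if_false]
      have hie : i = 2 * t.length := by omega
      subst hie
      symm
      rw [PySem.Chars.find_eq_neg_one_iff]
      intro hinf
      obtain ⟨pre, post, hdd⟩ := hinf
      have hplen : pre.length + w.length ≤ (t ++ t).length := by
        have : (t ++ t).length = pre.length + w.length + post.length := by
          rw [← hdd]; simp; omega
        omega
      have hocc : w <+: (t ++ t).drop pre.length := by
        rw [← hdd, List.append_assoc, List.drop_left]
        exact List.prefix_append w post
      rw [pvOcc_iff hplen] at hocc
      exact hsixth (pre.length + w.length) (by omega) hocc

-- ===== VERDICT (by name: the statement is the Claim_ definition above) =====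
theorem execute_kmp_circle_algorithm_spec : Claim_unchanged_execute_kmp_circle_algorithm := by
  intro word text _
  unfold Spec_execute_kmp_circle_algorithm
  intro hD
  unfold execute_kmp_circle_algorithm execute_kmp_circle_algorithm_alt
  by_cases hlen : word.toList.length = text.toList.length
  · have hne : ¬ (word.toList.length ≠ text.toList.length) := by omega
    simp only [hne, if_false]
    rcases Nat.eq_zero_or_pos text.toList.length with h0 | hn
    · exfalso
      apply hD
      have hwnil : word.toList = [] := by
        have : word.toList.length = 0 := by omega
        exact List.length_eq_zero_iff.mp this
      have htnil : text.toList = [] := by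
        exact List.length_eq_zero_iff.mp h0
      exact ⟨String.toList_eq_nil_iff.mp hwnil, String.toList_eq_nil_iff.mp htnil⟩
    · unfold pvGetPrefixes
      apply pvKmpLoop_eq_find word.toList text.toList _ hlen hn
        (pvGetPrefixes_spec word.toList).1 (pvGetPrefixes_spec word.toList).2
      · refine ⟨by omega, by omega, by omega, by simp, ?_, ?_⟩
        · intro k hk hks
          have h1 : (word.toList.take k).length = k := by
            rw [List.length_take]; omega
          have h2 := hks.length_le
          rw [h1, List.length_take] at h2
          omega
        · intro m hm hcon
          have : m = 0 := by omega
          subst this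
          simp only [List.take_zero] at hcon
          have := List.suffix_nil.mp hcon
          have : word.toList.length = 0 := by rw [this]; rfl
          omega
      · omega
  · have hx : ¬ word.length = text.length := by simpa using hlen
    simp [hx]

theorem execute_kmp_circle_algorithm_changed : Claim_changed_execute_kmp_circle_algorithm := by
  unfold Claim_changed_execute_kmp_circle_algorithm; decide

theorem execute_kmp_circle_algorithm_tight : Claim_exact_execute_kmp_circle_algorithm := by
  intro word text _ hD
  obtain ⟨hw, ht⟩ := hD
  subst hw; subst ht
  decide
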